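-- pv_equiv track=rewrite | github.com/dcoder201/Case-specific-Sorting-of-Strings | solution.py | caseSort
-- ===== SOURCE A (Python) =====
-- def caseSort(s,n):
--     #code here
--    ll=list(s)
--    ll.sort()
--    l1=[]
--    l2=[]
--    for i in ll:
--        if(i>='A' and i<='Z'):
--            l1.append(i)
--        else:
--            l2.append(i)
--    x=0
--    y=0
--    ss=""
--    for i in range(0,len(s)):
--        if(s[i]>='A' and s[i]<='Z'):
--          ss+=l1[x]
--          x=x+1
--        else:
--          ss+=l2[y]
--          y=y+1
--    return ss
-- ===== SOURCE B (Python) =====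
-- def caseSort(s, n):
--     # Counting sort with two tables (26-slot uppercase, 128-slot other) and an
--     # iterator-based merge: O(n), no comparison sort and no index counters.
--     cu = [0] * 26
--     co = [0] * 128
--     for c in s:
--         k = ord(c)
--         if 65 <= k <= 90:
--             cu[k - 65] += 1
--         else:
--             co[k] += 1
--     up = iter([chr(k + 65) for k in range(26) for _ in range(cu[k])])
--     lo = iter([chr(k) for k in range(128) for _ in range(co[k])])
--     return "".join(next(up) if 'A' <= c <= 'Z' else next(lo) for c in s)
-- ===== Notes on version B (the rewrite author's own statement) =====
-- stated objective: faster
-- what changed: Replaces the comparison sort plus partition-and-index rebuild with a counting sort split into two tables (a 26-slot uppercase table and a 128-slot table for the rest) whose sorted streams are consumed by iterators in a single generator-expression merge, removing both the sort and the explicit index counters.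
import Mathlib
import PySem

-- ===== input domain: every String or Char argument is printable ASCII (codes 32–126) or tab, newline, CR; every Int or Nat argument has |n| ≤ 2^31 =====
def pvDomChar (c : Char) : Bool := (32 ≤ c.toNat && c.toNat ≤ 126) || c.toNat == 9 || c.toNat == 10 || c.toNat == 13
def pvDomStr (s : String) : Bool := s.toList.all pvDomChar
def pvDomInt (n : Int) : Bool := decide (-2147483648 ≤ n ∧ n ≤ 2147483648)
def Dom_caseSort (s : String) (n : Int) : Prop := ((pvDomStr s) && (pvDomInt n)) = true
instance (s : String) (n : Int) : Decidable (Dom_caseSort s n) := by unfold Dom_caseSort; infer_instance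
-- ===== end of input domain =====

-- B replaces A's comparison sort + index-counter rebuild with a two-table counting sort
-- (26-slot uppercase table, 128-slot table for everything else) merged via iterators
-- (objective: faster, O(n) vs O(n log n)).

-- ===== PORT A =====
-- Literal port of A: sort the characters, split the sorted list into uppercase/other,
-- then rebuild the string position by position.  l1[x]/l2[y]/s[i] are ported with
-- pyGetD; the default is unreachable since the indices are in range by construction.
def caseSort (s : String) (n : Int) : String :=
  let ll := PySem.List.sorted s.toList (fun x => x) false
  let p := ll.foldl (fun (acc : List Char × List Char) i =>
      if 'A' ≤ i ∧ i ≤ 'Z' then (acc.1 ++ [i], acc.2) else (acc.1, acc.2 ++ [i])) ([], [])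
  let fin := (PySem.List.pyRange 0 (PySem.Str.len s) 1).foldl
      (fun (st : Int × Int × List Char) i =>
        let c := PySem.List.pyGetD s.toList i ' '
        if 'A' ≤ c ∧ c ≤ 'Z' then (st.1 + 1, st.2.1, st.2.2 ++ [PySem.List.pyGetD p.1 st.1 ' '])
        else (st.1, st.2.1 + 1, st.2.2 ++ [PySem.List.pyGetD p.2 st.2.1 ' ']))
      ((0 : Int), (0 : Int), ([] : List Char))
  String.ofList fin.2.2

-- ===== PORT B =====
-- Literal port of Source B.  The two counting tables cu/co are modelled as functions
-- Nat → Nat updated in place (the in-place `cu[k-65] += 1` / `co[k] += 1`).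
def bCount (l : List Char) : (Nat → Nat) × (Nat → Nat) :=
  l.foldl (fun (t : (Nat → Nat) × (Nat → Nat)) c =>
      if 65 ≤ c.toNat ∧ c.toNat ≤ 90 then
        (fun j => if j = c.toNat - 65 then t.1 j + 1 else t.1 j, t.2)
      else
        (t.1, fun j => if j = c.toNat then t.2 j + 1 else t.2 j))
    (fun _ => 0, fun _ => 0)

-- next(up)/next(lo) on the two iterators = take the head, keep the tail; the
-- StopIteration default ' ' is unreachable since each stream holds exactly as many
-- characters as its class occurs in s.
def bMerge : List Char → List Char → List Char → List Char
  | [], _, _ => []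
  | c :: cs, up, lo =>
    if 'A' ≤ c ∧ c ≤ 'Z' then up.headD ' ' :: bMerge cs up.tail lo
    else lo.headD ' ' :: bMerge cs up lo.tail

def caseSort_alt (s : String) (n : Int) : String :=
  let t := bCount s.toList
  let up := (List.range 26).flatMap (fun k => List.replicate (t.1 k) (Char.ofNat (k + 65)))
  let lo := (List.range 128).flatMap (fun k => List.replicate (t.2 k) (Char.ofNat k))
  String.ofList (bMerge s.toList up lo)

-- ===== PRECONDITION & SPEC =====
def Spec_caseSort (s : String) (n : Int) (out : String) : Prop := out = caseSort_alt s n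
instance (s : String) (n : Int) (out : String) : Decidable (Spec_caseSort s n out) := by unfold Spec_caseSort; infer_instance

-- ===== CLAIM (what is proved, stated in full; the proofs are below) =====
def Claim_equal_caseSort : Prop := ∀ (s : String) (n : Int), Dom_caseSort s n → Spec_caseSort s n (caseSort s n)

-- ===== LEMMAS AND PROOFS =====

-- the partition-fold shape of A's split loop
theorem partitionFold {α : Type} (P : α → Prop) [DecidablePred P] (g : α → List Char)
    (ks : List α) (a b : List Char) :
    ks.foldl (fun (acc : List Char × List Char) k =>
        if P k then (acc.1 ++ g k, acc.2) else (acc.1, acc.2 ++ g k)) (a, b)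
      = (a ++ (ks.filter (fun k => decide (P k))).flatMap g,
         b ++ (ks.filter (fun k => !decide (P k))).flatMap g) := by
  induction ks generalizing a b with
  | nil => simp
  | cons k ks ih =>
      by_cases h : P k <;> simp [h, ih, List.append_assoc]

-- the canonical (counting-sort) expansion of a list of chars with codes < 128
def expand (l : List Char) : List Char :=
  (List.range 128).flatMap (fun k => List.replicate ((l.map Char.toNat).count k) (Char.ofNat k))

theorem charToNat_injective : Function.Injective Char.toNat := by
  intro a b h
  rw [← Char.ofNat_toNat a, ← Char.ofNat_toNat b, h]

theorem toNat_ofNat128 : ∀ k : Nat, k < 128 → (Char.ofNat k).toNat = k := by decide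

theorem upChar_iff128 : ∀ k : Nat, k < 128 →
    (('A' ≤ Char.ofNat k ∧ Char.ofNat k ≤ 'Z') ↔ (65 ≤ k ∧ k ≤ 90)) := by decide

set_option maxRecDepth 10000 in
theorem ofNat_mono128 : ∀ k1 : Nat, k1 < 128 → ∀ k2 : Nat, k2 < 128 →
    k1 ≤ k2 → Char.ofNat k1 ≤ Char.ofNat k2 := by decide

-- summing a one-point indicator over range n picks out the indexed value
theorem sum_pick (m : Nat → Nat) (a : Char) :
    ∀ n : Nat, n ≤ 128 →
      ((List.range n).map (fun k => if Char.ofNat k = a then m k else 0)).sum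
        = if a.toNat < n then m a.toNat else 0
  | 0, _ => by simp
  | n+1, h => by
      rw [List.range_succ, List.map_append, List.sum_append, sum_pick m a n (by omega)]
      simp only [List.map_cons, List.map_nil, List.sum_cons, List.sum_nil]
      have hiff : Char.ofNat n = a ↔ a.toNat = n :=
        ⟨fun he => by rw [← he, toNat_ofNat128 n (by omega)],
         fun hEq => by rw [← hEq, Char.ofNat_toNat]⟩
      split_ifs <;> simp_all <;> omega

theorem count_expand (l : List Char) (h : ∀ c ∈ l, c.toNat < 128) (a : Char) :
    (expand l).count a = l.count a := by
  rw [expand, List.count_flatMap]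
  have hmap : List.map (List.count a ∘ fun k =>
        List.replicate ((l.map Char.toNat).count k) (Char.ofNat k)) (List.range 128)
      = (List.range 128).map
          (fun k => if Char.ofNat k = a then (l.map Char.toNat).count k else 0) := by
    apply List.map_congr_left
    intro k _
    simp [List.count_replicate]
  rw [hmap, sum_pick _ a 128 le_rfl]
  by_cases ha : a.toNat < 128
  · rw [if_pos ha, List.count_map_of_injective l Char.toNat charToNat_injective a]
  · rw [if_neg ha, eq_comm, List.count_eq_zero]
    intro hmem; exact ha (h a hmem)

theorem expand_perm (l : List Char) (h : ∀ c ∈ l, c.toNat < 128) : (expand l).Perm l :=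
  List.perm_iff_count.mpr (count_expand l h)

theorem expand_pairwise (l : List Char) : (expand l).Pairwise (fun a b => a ≤ b) := by
  rw [expand, List.pairwise_flatMap]
  refine ⟨fun k _ => ?_, ?_⟩
  · rw [List.pairwise_replicate]; exact Or.inr le_rfl
  · refine List.Pairwise.imp_of_mem ?_ List.pairwise_lt_range
    intro k1 k2 h1 h2 hlt x hx y hy
    rw [List.eq_of_mem_replicate hx, List.eq_of_mem_replicate hy]
    exact ofNat_mono128 k1 (List.mem_range.mp h1) k2 (List.mem_range.mp h2) (Nat.le_of_lt hlt)

theorem flatMap_if_filter {α : Type} (q : α → Bool) (f : α → List Char) (l : List α) :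
    (l.flatMap fun k => if q k then f k else []) = (l.filter q).flatMap f := by
  induction l with
  | nil => rfl
  | cons k l ih => by_cases h : q k <;> simp [h, ih]

theorem filter_expand (l : List Char) (p : Char → Bool) :
    (expand l).filter p
      = ((List.range 128).filter (fun k => p (Char.ofNat k))).flatMap
          (fun k => List.replicate ((l.map Char.toNat).count k) (Char.ofNat k)) := by
  rw [expand, List.filter_flatMap, ← flatMap_if_filter]
  simp only [List.filter_replicate]

theorem sorted_eq_expand (l : List Char) (h : ∀ c ∈ l, c.toNat < 128) :
    PySem.List.sorted l (fun x => x) false = expand l := by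
  exact PySem.List.sorted_id_eq_of_perm_of_pairwise l (expand l) (expand_perm l h) (expand_pairwise l)

-- A's Int-indexed rebuild loop equals the Nat-indexed one
theorem rebuild_eq (cs l1 l2 : List Char) (x y : Nat) (acc : List Char) :
    (cs.foldl (fun (st : Int × Int × List Char) c =>
        if 'A' ≤ c ∧ c ≤ 'Z' then (st.1 + 1, st.2.1, st.2.2 ++ [PySem.List.pyGetD l1 st.1 ' '])
        else (st.1, st.2.1 + 1, st.2.2 ++ [PySem.List.pyGetD l2 st.2.1 ' ']))
      ((x : Int), (y : Int), acc)).2.2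
    = (cs.foldl (fun (st : Nat × Nat × List Char) c =>
        if 'A' ≤ c ∧ c ≤ 'Z' then (st.1 + 1, st.2.1, st.2.2 ++ [l1.getD st.1 ' '])
        else (st.1, st.2.1 + 1, st.2.2 ++ [l2.getD st.2.1 ' ']))
      (x, y, acc)).2.2 := by
  induction cs generalizing x y acc with
  | nil => rfl
  | cons c cs ih =>
      by_cases h : 'A' ≤ c ∧ c ≤ 'Z'
      · simp only [List.foldl_cons, if_pos h, PySem.List.pyGetD_natCast]
        have hx : (x : Int) + 1 = ((x + 1 : Nat) : Int) := by push_cast; ring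
        rw [hx]; exact ih (x + 1) y _
      · simp only [List.foldl_cons, if_neg h, PySem.List.pyGetD_natCast]
        have hy : (y : Int) + 1 = ((y + 1 : Nat) : Int) := by push_cast; ring
        rw [hy]; exact ih x (y + 1) _

-- A's index-based rebuild over range(len(s)) equals the Nat-indexed fold over the chars
theorem rebuild_final (s : String) (l1 l2 : List Char) :
    (List.foldl (fun (st : Int × Int × List Char) i =>
        if 'A' ≤ PySem.List.pyGetD s.toList i ' ' ∧ PySem.List.pyGetD s.toList i ' ' ≤ 'Z' then
          (st.1 + 1, st.2.1, st.2.2 ++ [PySem.List.pyGetD l1 st.1 ' '])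
        else (st.1, st.2.1 + 1, st.2.2 ++ [PySem.List.pyGetD l2 st.2.1 ' ']))
      (0, 0, []) (PySem.List.pyRange 0 (PySem.Str.len s) 1)).2.2
    = (List.foldl (fun (st : Nat × Nat × List Char) c =>
        if 'A' ≤ c ∧ c ≤ 'Z' then (st.1 + 1, st.2.1, st.2.2 ++ [l1.getD st.1 ' '])
        else (st.1, st.2.1 + 1, st.2.2 ++ [l2.getD st.2.1 ' ']))
      (0, 0, []) s.toList).2.2 := by
  rw [PySem.Str.len_eq]
  rw [PySem.List.foldl_pyRange_zero_pyGetD' s.toList ' '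
    (fun (st : Int × Int × List Char) c =>
      if 'A' ≤ c ∧ c ≤ 'Z' then (st.1 + 1, st.2.1, st.2.2 ++ [PySem.List.pyGetD l1 st.1 ' '])
      else (st.1, st.2.1 + 1, st.2.2 ++ [PySem.List.pyGetD l2 st.2.1 ' ']))
    ((0 : Int), (0 : Int), ([] : List Char))]
  have h := rebuild_eq s.toList l1 l2 0 0 []
  simpa using h

-- the Nat-indexed fold equals B's head-consuming merge
theorem fold_eq_bMerge (cs l1 l2 : List Char) (x y : Nat) (acc : List Char) :
    (cs.foldl (fun (st : Nat × Nat × List Char) c =>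
        if 'A' ≤ c ∧ c ≤ 'Z' then (st.1 + 1, st.2.1, st.2.2 ++ [l1.getD st.1 ' '])
        else (st.1, st.2.1 + 1, st.2.2 ++ [l2.getD st.2.1 ' ']))
      (x, y, acc)).2.2
    = acc ++ bMerge cs (l1.drop x) (l2.drop y) := by
  induction cs generalizing x y acc with
  | nil => simp [bMerge]
  | cons c cs ih =>
      by_cases h : 'A' ≤ c ∧ c ≤ 'Z'
      · rw [List.foldl_cons, if_pos h, ih (x + 1) y _]
        simp [bMerge, h, List.tail_drop]
      · rw [List.foldl_cons, if_neg h, ih x (y + 1) _]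
        simp [bMerge, h, List.tail_drop]

-- pointwise congruence for flatMap
theorem flatMap_congr' {α β : Type} (l : List α) (f g : α → List β)
    (h : ∀ x ∈ l, f x = g x) : l.flatMap f = l.flatMap g := by
  induction l with
  | nil => rfl
  | cons a l ih =>
      simp only [List.flatMap_cons, h a (List.mem_cons_self), ih (fun x hx => h x (List.mem_cons_of_mem a hx))]

-- B's uppercase counting table is the code count of k+65 in the whole string
theorem bCount_fst (l : List Char) (t : (Nat → Nat) × (Nat → Nat)) (k : Nat) (hk : k < 26) :
    (l.foldl (fun (t : (Nat → Nat) × (Nat → Nat)) c =>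
        if 65 ≤ c.toNat ∧ c.toNat ≤ 90 then
          (fun j => if j = c.toNat - 65 then t.1 j + 1 else t.1 j, t.2)
        else
          (t.1, fun j => if j = c.toNat then t.2 j + 1 else t.2 j)) t).1 k
      = t.1 k + (l.map Char.toNat).count (k + 65) := by
  induction l generalizing t with
  | nil => simp
  | cons c l ih =>
      rw [List.foldl_cons]
      by_cases h : 65 ≤ c.toNat ∧ c.toNat ≤ 90
      · rw [if_pos h, ih]
        simp only [List.map_cons, List.count_cons, beq_iff_eq]
        split_ifs <;> omega
      · rw [if_neg h, ih]
        simp only [List.map_cons, List.count_cons, beq_iff_eq]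
        split_ifs <;> omega

-- B's other counting table: the code count for non-uppercase codes, untouched (0) for
-- uppercase codes
theorem bCount_snd (l : List Char) (t : (Nat → Nat) × (Nat → Nat)) (k : Nat) :
    (l.foldl (fun (t : (Nat → Nat) × (Nat → Nat)) c =>
        if 65 ≤ c.toNat ∧ c.toNat ≤ 90 then
          (fun j => if j = c.toNat - 65 then t.1 j + 1 else t.1 j, t.2)
        else
          (t.1, fun j => if j = c.toNat then t.2 j + 1 else t.2 j)) t).2 k
      = if 65 ≤ k ∧ k ≤ 90 then t.2 k else t.2 k + (l.map Char.toNat).count k := by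
  induction l generalizing t with
  | nil => split_ifs <;> simp
  | cons c l ih =>
      rw [List.foldl_cons]
      by_cases h : 65 ≤ c.toNat ∧ c.toNat ≤ 90
      · rw [if_pos h, ih]
        simp only [List.map_cons, List.count_cons, beq_iff_eq]
        split_ifs <;> omega
      · rw [if_neg h, ih]
        simp only [List.map_cons, List.count_cons, beq_iff_eq]
        split_ifs <;> omega

-- concrete reindexing of the uppercase code range
theorem range_filter_up :
    (List.range 128).filter (fun k => decide (65 ≤ k ∧ k ≤ 90)) = (List.range 26).map (· + 65) := by
  decide

-- ===== VERDICT (by name: the statement is the Claim_ definition above) =====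
theorem caseSort_spec : Claim_equal_caseSort := by
  intro s n hDom
  show caseSort s n = caseSort_alt s n
  have hDom' : (pvDomStr s && pvDomInt n) = true := hDom
  have h128 : ∀ c ∈ s.toList, c.toNat < 128 := by
    intro c hc
    simp only [Bool.and_eq_true] at hDom'
    have hc' := List.all_eq_true.mp hDom'.1 c hc
    unfold pvDomChar at hc'
    simp only [Bool.or_eq_true, Bool.and_eq_true, decide_eq_true_eq, beq_iff_eq] at hc'
    omega
  have hup : (expand s.toList).filter (fun c => decide ('A' ≤ c ∧ c ≤ 'Z'))
      = (List.range 26).flatMap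
          (fun k => List.replicate ((bCount s.toList).1 k) (Char.ofNat (k + 65))) := by
    rw [filter_expand]
    have hf : (List.range 128).filter (fun k => decide ('A' ≤ Char.ofNat k ∧ Char.ofNat k ≤ 'Z'))
        = (List.range 128).filter (fun k => decide (65 ≤ k ∧ k ≤ 90)) := by
      apply List.filter_congr
      intro k hk
      simp only [decide_eq_decide]
      exact upChar_iff128 k (List.mem_range.mp hk)
    rw [hf, range_filter_up, List.flatMap_map]
    apply flatMap_congr'
    intro k hk
    rw [bCount, bCount_fst s.toList _ k (List.mem_range.mp hk)]
    simp
  have hlo : (expand s.toList).filter (fun c => !decide ('A' ≤ c ∧ c ≤ 'Z'))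
      = (List.range 128).flatMap
          (fun k => List.replicate ((bCount s.toList).2 k) (Char.ofNat k)) := by
    rw [filter_expand]
    have hf : (List.range 128).filter (fun k => !decide ('A' ≤ Char.ofNat k ∧ Char.ofNat k ≤ 'Z'))
        = (List.range 128).filter (fun k => !decide (65 ≤ k ∧ k ≤ 90)) := by
      apply List.filter_congr
      intro k hk
      have := upChar_iff128 k (List.mem_range.mp hk)
      congr 1
      simp only [decide_eq_decide]
      exact this
    rw [hf, ← flatMap_if_filter]
    apply flatMap_congr'
    intro k hk
    rw [bCount, bCount_snd s.toList _ k]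
    by_cases h : 65 ≤ k ∧ k ≤ 90
    · simp [h]
    · simp [h]
  simp only [caseSort, caseSort_alt]
  rw [sorted_eq_expand s.toList h128]
  rw [partitionFold (fun c => 'A' ≤ c ∧ c ≤ 'Z') (fun c => [c]) (expand s.toList) [] []]
  simp only [List.nil_append, List.flatMap_singleton']
  rw [rebuild_final s _ _, fold_eq_bMerge _ _ _ 0 0 []]
  simp only [List.drop_zero, List.nil_append]
  rw [hup, hlo]
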